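-- pv_equiv track=rewrite | github.com/Adam-Jimenez/binarysearch-editorials | Matrix Rectangular Sums.py | solve
-- ===== SOURCE A (Python) =====
-- from collections import defaultdict
--
-- def solve(matrix, k):
--     pre=defaultdict(int)
--     R,C = len(matrix), len(matrix[0])
--     for i in range(R+k):
--         for j in range(C+k):
--             pre[(i,j)] = pre[(i-1,j)] \
--             + pre[(i,j-1)] \
--             - pre[(i-1,j-1)]
--             if i<len(matrix) and j < len(matrix[0]):
--                 pre[(i,j)] += matrix[i][j]
--     return [[
--             pre[(i+k, j+k)] \
--             + pre[(i-k-1, j-k-1)] \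
--             - pre[(i+k, j-k-1)] \
--             - pre[(i-k-1, j+k)]
--             for j in range(C)
--         ] for i in range(R)]
-- ===== SOURCE B (Python) =====
-- def solve(matrix, k):
--     R, C = len(matrix), len(matrix[0])
--     # horizontal sliding window: H[i][j] = sum of matrix[i][max(0,j-k)..min(C-1,j+k)]
--     H = []
--     for row in matrix:
--         s = sum(row[:min(k + 1, C)])
--         line = [s]
--         for j in range(1, C):
--             if j + k < C:
--                 s += row[j + k]
--             if j - k >= 1:
--                 s -= row[j - k - 1]
--             line.append(s)
--         H.append(line)
--     # vertical sliding window: acc[j] = sum of H[r][j] over the current row window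
--     acc = [0] * C
--     for r in H[:k + 1]:
--         acc = [a + x for a, x in zip(acc, r)]
--     out = []
--     for i in range(R):
--         out.append(acc)
--         if i + k + 1 < R:
--             acc = [a + x for a, x in zip(acc, H[i + k + 1])]
--         if i - k >= 0:
--             acc = [a - x for a, x in zip(acc, H[i - k])]
--     return out
-- ===== Notes on version B (the rewrite author's own statement) =====
-- stated objective: faster
-- what changed: Replaces A's 2D prefix-sum table (a defaultdict built over a padded (R+k)x(C+k) index range, answered by 4-corner inclusion-exclusion) with a separable sliding-window box filter: one horizontal pass keeps a running window sum per row, then one vertical pass keeps a per-column running window vector updated by adding the entering row and subtracting the leaving row; no prefix table and no inclusion-exclusion.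
-- outside the precondition, e.g. on solve([[1]], -1): A returns [[0]], B raises IndexError
import Mathlib
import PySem

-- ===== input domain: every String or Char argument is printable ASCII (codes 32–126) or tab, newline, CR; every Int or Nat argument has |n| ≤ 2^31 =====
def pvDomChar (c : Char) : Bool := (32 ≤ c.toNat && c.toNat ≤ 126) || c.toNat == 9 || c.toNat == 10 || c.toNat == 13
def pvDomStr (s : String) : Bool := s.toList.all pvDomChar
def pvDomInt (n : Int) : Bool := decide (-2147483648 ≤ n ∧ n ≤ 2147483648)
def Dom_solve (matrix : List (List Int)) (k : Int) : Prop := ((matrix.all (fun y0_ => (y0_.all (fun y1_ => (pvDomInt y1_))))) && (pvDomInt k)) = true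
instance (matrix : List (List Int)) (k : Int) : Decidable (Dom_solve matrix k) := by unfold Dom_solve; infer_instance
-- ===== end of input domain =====

-- B replaces A's defaultdict 2D prefix table over a padded (R+k)x(C+k) index range (answered by
-- 4-corner inclusion-exclusion) with a separable sliding-window box filter: a horizontal pass with a
-- running window sum per row, then a vertical pass with a per-column running window vector
-- (objective: faster, measured).

-- ===== PORT A =====
-- matrix[a][b]; out-of-range access raises IndexError in Python — Pre_solve excludes those inputs
def mget (matrix : List (List Int)) (a b : Int) : Int :=
  PySem.List.pyGetD (PySem.List.pyGetD matrix a []) b 0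
-- pre = defaultdict(int); reads are getD _ 0 (the zeros a defaultdict read would insert never change any lookup)
def solve (matrix : List (List Int)) (k : Int) : List (List Int) :=
  let R : Int := matrix.length
  let C : Int := (matrix.headD []).length
  let pre : Std.HashMap (Int × Int) Int :=
    (PySem.List.pyRange 0 (R + k) 1).foldl (fun d i =>
      (PySem.List.pyRange 0 (C + k) 1).foldl (fun d j =>
        let d := d.insert (i, j)
          (d.getD (i - 1, j) 0 + d.getD (i, j - 1) 0 - d.getD (i - 1, j - 1) 0)
        if i < R ∧ j < C then
          d.insert (i, j) (d.getD (i, j) 0 + mget matrix i j)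
        else d) d) ∅
  (PySem.List.pyRange 0 R 1).map (fun i =>
    (PySem.List.pyRange 0 C 1).map (fun j =>
      pre.getD (i + k, j + k) 0 + pre.getD (i - k - 1, j - k - 1) 0
        - pre.getD (i + k, j - k - 1) 0 - pre.getD (i - k - 1, j + k) 0))

-- ===== PORT B =====
-- Source B's horizontal pass: the loop body (update the running window sum s, append it) …
def hBody (C k : Int) (row : List Int) (st : List Int × Int) (j : Int) : List Int × Int :=
  let s := if j + k < C then st.2 + PySem.List.pyGetD row (j + k) 0 else st.2
  let s := if 1 ≤ j - k then s - PySem.List.pyGetD row (j - k - 1) 0 else s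
  (st.1 ++ [s], s)
-- … and the pass itself for one row
def hRow (C k : Int) (row : List Int) : List Int :=
  let s0 := (PySem.List.slice row none (some (min (k + 1) C))).sum
  ((PySem.List.pyRange 1 C 1).foldl (hBody C k row) ([s0], s0)).1

def solve_alt (matrix : List (List Int)) (k : Int) : List (List Int) :=
  let R : Int := matrix.length
  let C : Int := (matrix.headD []).length
  let H := matrix.foldl (fun H row => H ++ [hRow C k row]) []
  let acc0 := (PySem.List.slice H none (some (k + 1))).foldl
      (fun acc r => List.zipWith (· + ·) acc r) (PySem.List.pyRepeat [0] C)
  ((PySem.List.pyRange 0 R 1).foldl (fun (st : List (List Int) × List Int) i =>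
      let out := st.1 ++ [st.2]
      let acc := if i + k + 1 < R then List.zipWith (· + ·) st.2 (PySem.List.pyGetD H (i + k + 1) []) else st.2
      let acc := if 0 ≤ i - k then List.zipWith (· - ·) acc (PySem.List.pyGetD H (i - k) []) else acc
      (out, acc)) ([], acc0)).1

-- ===== PRECONDITION & SPEC =====
-- Pre_solve excludes: the empty matrix and matrices having a row shorter than row 0 (Python A
-- raises IndexError on both), and negative k (a negative radius is outside the task's natural
-- domain; A returns a table of zero-padded leftovers there, B raises IndexError).
def Pre_solve (matrix : List (List Int)) (k : Int) : Prop :=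
  matrix ≠ [] ∧ 0 ≤ k ∧ ∀ row ∈ matrix, (matrix.headD []).length ≤ row.length
instance (matrix : List (List Int)) (k : Int) : Decidable (Pre_solve matrix k) := by
  unfold Pre_solve; infer_instance

def pvWitness_solve : List (List Int) × Int := ([[1, 2], [3, 4]], 1)

def Spec_solve (matrix : List (List Int)) (k : Int) (out : List (List Int)) : Prop := out = solve_alt matrix k
instance (matrix : List (List Int)) (k : Int) (out : List (List Int)) : Decidable (Spec_solve matrix k out) := by unfold Spec_solve; infer_instance

-- ===== CLAIM (what is proved, stated in full; the proofs are below) =====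
def Claim_equal_solve : Prop := ∀ (matrix : List (List Int)) (k : Int), Dom_solve matrix k → Pre_solve matrix k → Spec_solve matrix k (solve matrix k)

-- ===== LEMMAS AND PROOFS =====

-- the mathematical prefix sum A's dict holds: first r rows, first (min c C) columns
def Pn (matrix : List (List Int)) (Cn r c : Nat) : Int :=
  ((matrix.take r).map (fun row => (row.take (min c Cn)).sum)).sum
def Pm (matrix : List (List Int)) (Cn : Nat) (a b : Int) : Int :=
  Pn matrix Cn (a + 1).toNat (b + 1).toNat

lemma takeSum (L : List Int) (n : Nat) :
    (L.take (n + 1)).sum = (L.take n).sum + L.getD n 0 := by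
  rw [List.take_add_one, List.sum_append]
  cases h : L[n]? <;> simp [List.getD_eq_getElem?_getD, h]

lemma Pn_col_zero (m : List (List Int)) (Cn r : Nat) : Pn m Cn r 0 = 0 := by
  simp [Pn]

lemma Pn_row_zero (m : List (List Int)) (Cn c : Nat) : Pn m Cn 0 c = 0 := by
  simp [Pn]

lemma Pn_row_succ (m : List (List Int)) (Cn r c : Nat) :
    Pn m Cn (r + 1) c = Pn m Cn r c + ((m.getD r []).take (min c Cn)).sum := by
  have h1 : ∀ s : Nat, Pn m Cn s c = ((m.map (fun row => (row.take (min c Cn)).sum)).take s).sum := by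
    intro s; rw [Pn, List.map_take]
  rw [h1, h1, takeSum]
  by_cases hr : r < m.length
  · simp [List.getD_eq_getElem?_getD, hr]
  · rw [List.getD_eq_getElem?_getD, List.getElem?_map]
    rw [List.getElem?_eq_none (by omega), List.getD_eq_getElem?_getD, List.getElem?_eq_none (by omega)]
    simp

lemma Pn_row_clamp (m : List (List Int)) (Cn r c : Nat) (h : m.length ≤ r) :
    Pn m Cn r c = Pn m Cn m.length c := by
  rw [Pn, Pn, List.take_of_length_le h, List.take_length]

lemma Pm_neg_left (m : List (List Int)) (Cn : Nat) (a b : Int) (h : a < 0) :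
    Pm m Cn a b = 0 := by
  have : (a+1).toNat = 0 := by omega
  rw [Pm, this, Pn_row_zero]

lemma Pm_neg_right (m : List (List Int)) (Cn : Nat) (a b : Int) (h : b < 0) :
    Pm m Cn a b = 0 := by
  have : (b+1).toNat = 0 := by omega
  rw [Pm, this, Pn_col_zero]

lemma Pm_rec (m : List (List Int)) (Cn : Nat)
    (a b : Int) (ha : 0 ≤ a) (hb : 0 ≤ b) :
    Pm m Cn a b = Pm m Cn (a - 1) b + Pm m Cn a (b - 1) - Pm m Cn (a - 1) (b - 1)
      + (if a < (m.length : Int) ∧ b < (Cn : Int) then mget m a b else 0) := by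
  obtain ⟨r, rfl⟩ : ∃ r : Nat, a = (r : Int) := ⟨a.toNat, by omega⟩
  obtain ⟨c, rfl⟩ : ∃ c : Nat, b = (c : Int) := ⟨b.toNat, by omega⟩
  have e1 : ((r:Int) + 1).toNat = r + 1 := by omega
  have e2 : ((r:Int) - 1 + 1).toNat = r := by omega
  have e3 : ((c:Int) + 1).toNat = c + 1 := by omega
  have e4 : ((c:Int) - 1 + 1).toNat = c := by omega
  simp only [Pm, e1, e2, e3, e4]
  rw [Pn_row_succ, Pn_row_succ]
  have hm : mget m r c = (m.getD r []).getD c 0 := by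
    simp [mget]
  by_cases hc : c < Cn
  · have m1 : min (c + 1) Cn = c + 1 := by omega
    have m2 : min c Cn = c := by omega
    rw [m1, m2, takeSum, hm]
    by_cases hr : r < m.length
    · rw [if_pos ⟨by exact_mod_cast hr, by exact_mod_cast hc⟩]; ring
    · have hnone : m[r]? = none := List.getElem?_eq_none (by omega)
      rw [if_neg (by omega)]
      simp [List.getD_eq_getElem?_getD, hnone]
  · have m1 : min (c + 1) Cn = Cn := by omega
    have m2 : min c Cn = Cn := by omega
    rw [m1, m2, if_neg (by omega)]
    ring

-- A's dict build, named for the proofs (definitionally the fold inside solve)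
def AInner (m : List (List Int)) (i : Int) (d : Std.HashMap (Int × Int) Int) (j : Int) :
    Std.HashMap (Int × Int) Int :=
  let d := d.insert (i, j)
    (d.getD (i - 1, j) 0 + d.getD (i, j - 1) 0 - d.getD (i - 1, j - 1) 0)
  if i < (m.length : Int) ∧ j < ((m.headD []).length : Int) then
    d.insert (i, j) (d.getD (i, j) 0 + mget m i j)
  else d

def ABuild (m : List (List Int)) (k : Int) : Std.HashMap (Int × Int) Int :=
  (PySem.List.pyRange 0 ((m.length : Int) + k) 1).foldl
    (fun d i => (PySem.List.pyRange 0 (((m.headD []).length : Int) + k) 1).foldl (AInner m i) d)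
    ∅

-- the dict's contents mid-build: rows < i complete, row i filled for columns < j
def HF (m : List (List Int)) (bc i j a b : Int) : Int :=
  if (0 ≤ a ∧ a < i ∧ 0 ≤ b ∧ b < bc) ∨ (a = i ∧ 0 ≤ b ∧ b < j) then
    Pm m (m.headD []).length a b
  else 0

lemma HF_bump (m : List (List Int)) (bc i j a b : Int) (hne : ¬(a = i ∧ b = j)) :
    HF m bc i j a b = HF m bc i (j + 1) a b := by
  unfold HF
  rw [if_congr (show ((0 ≤ a ∧ a < i ∧ 0 ≤ b ∧ b < bc) ∨ (a = i ∧ 0 ≤ b ∧ b < j)) ↔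
    ((0 ≤ a ∧ a < i ∧ 0 ≤ b ∧ b < bc) ∨ (a = i ∧ 0 ≤ b ∧ b < j + 1)) by omega) rfl rfl]

lemma AInner_step (m : List (List Int)) (bc i j : Int) (hi : 0 ≤ i) (hj : 0 ≤ j) (hjb : j < bc)
    (d : Std.HashMap (Int × Int) Int) (hd : ∀ a b, d.getD (a, b) 0 = HF m bc i j a b) :
    ∀ a b, (AInner m i d j).getD (a, b) 0 = HF m bc i (j + 1) a b := by
  intro a b
  have h1 : d.getD (i - 1, j) 0 = Pm m (m.headD []).length (i - 1) j := by
    rw [hd]; unfold HF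
    by_cases hi1 : 1 ≤ i
    · rw [if_pos (Or.inl ⟨by omega, by omega, hj, hjb⟩)]
    · rw [if_neg (by omega), Pm_neg_left _ _ _ _ (by omega)]
  have h2 : d.getD (i, j - 1) 0 = Pm m (m.headD []).length i (j - 1) := by
    rw [hd]; unfold HF
    by_cases hj1 : 1 ≤ j
    · rw [if_pos (Or.inr ⟨rfl, by omega, by omega⟩)]
    · rw [if_neg (by omega), Pm_neg_right _ _ _ _ (by omega)]
  have h3 : d.getD (i - 1, j - 1) 0 = Pm m (m.headD []).length (i - 1) (j - 1) := by
    rw [hd]; unfold HF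
    by_cases hi1 : 1 ≤ i
    · by_cases hj1 : 1 ≤ j
      · rw [if_pos (Or.inl ⟨by omega, by omega, by omega, by omega⟩)]
      · rw [if_neg (by omega), Pm_neg_right _ _ _ _ (by omega)]
    · rw [if_neg (by omega), Pm_neg_left _ _ _ _ (by omega)]
  have hins : ∀ (e : Std.HashMap (Int × Int) Int) (w x y : Int),
      (e.insert (i, j) w).getD (x, y) 0 = if (i, j) = ((x, y) : Int × Int) then w else e.getD (x, y) 0 := by
    intro e w x y
    simp [Std.HashMap.getD_insert]
  simp only [AInner]
  split_ifs with hcond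
  · simp only [hins]
    by_cases heq : ((i, j) : Int × Int) = (a, b)
    · have ha' : i = a := congrArg Prod.fst heq
      have hb' : j = b := congrArg Prod.snd heq
      subst ha'; subst hb'
      simp only [if_true]
      rw [h1, h2, h3, HF, if_pos (Or.inr ⟨rfl, hj, by omega⟩),
        Pm_rec m _ i j hi hj, if_pos hcond]
    · rw [if_neg heq, if_neg heq, hd, HF_bump]
      simp only [Prod.ext_iff] at heq
      omega
  · simp only [hins]
    by_cases heq : ((i, j) : Int × Int) = (a, b)
    · have ha' : i = a := congrArg Prod.fst heq
      have hb' : j = b := congrArg Prod.snd heq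
      subst ha'; subst hb'
      simp only [if_true]
      rw [h1, h2, h3, HF, if_pos (Or.inr ⟨rfl, hj, by omega⟩),
        Pm_rec m _ i j hi hj, if_neg hcond]
      ring
    · rw [if_neg heq, hd, HF_bump]
      simp only [Prod.ext_iff] at heq
      omega

lemma inner_fold (m : List (List Int)) (bc i : Int) (hi : 0 ≤ i)
    (n : Nat) (hn : (n : Int) ≤ bc)
    (d : Std.HashMap (Int × Int) Int) (hd : ∀ a b, d.getD (a, b) 0 = HF m bc i 0 a b) :
    ∀ a b, ((PySem.List.pyRange 0 (n : Int) 1).foldl (AInner m i) d).getD (a, b) 0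
      = HF m bc i (n : Int) a b := by
  induction n with
  | zero => rw [PySem.List.pyRange_one_eq_nil (by omega)]; exact hd
  | succ n ih =>
    rw [show (((n + 1 : Nat)) : Int) = (n : Int) + 1 by push_cast; ring,
      PySem.List.pyRange_one_succ_right (by omega), List.foldl_append, List.foldl_cons,
      List.foldl_nil]
    exact AInner_step m bc i n hi (by omega) (by omega) _ (ih (by omega))

lemma HF_advance (m : List (List Int)) (bc i a b : Int) (hi : 0 ≤ i) :
    HF m bc i bc a b = HF m bc (i + 1) 0 a b := by
  unfold HF
  rw [if_congr (show ((0 ≤ a ∧ a < i ∧ 0 ≤ b ∧ b < bc) ∨ (a = i ∧ 0 ≤ b ∧ b < bc)) ↔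
    ((0 ≤ a ∧ a < i + 1 ∧ 0 ≤ b ∧ b < bc) ∨ (a = i + 1 ∧ 0 ≤ b ∧ b < 0)) by omega) rfl rfl]

lemma outer_fold (m : List (List Int)) (bc : Int) (hbc : 0 ≤ bc) (n : Nat) :
    ∀ a b, (((PySem.List.pyRange 0 (n : Int) 1).foldl
        (fun d i => (PySem.List.pyRange 0 bc 1).foldl (AInner m i) d)
        (∅ : Std.HashMap (Int × Int) Int))).getD (a, b) 0 = HF m bc (n : Int) 0 a b := by
  induction n with
  | zero =>
    intro a b
    rw [PySem.List.pyRange_one_eq_nil (a := 0) (b := ((0 : Nat) : Int)) (by omega),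
      List.foldl_nil, Std.HashMap.getD_empty, HF, if_neg (by omega)]
  | succ n ih =>
    rw [show (((n + 1 : Nat)) : Int) = (n : Int) + 1 by push_cast; ring,
      PySem.List.pyRange_one_succ_right (by omega), List.foldl_append, List.foldl_cons,
      List.foldl_nil]
    intro a b
    have hbn : bc = ((bc.toNat : Nat) : Int) := by omega
    rw [hbn] at ih ⊢
    rw [inner_fold m _ (n : Int) (by omega) bc.toNat (by omega) _ ih a b, HF_advance _ _ _ _ _ (by omega)]

lemma dict_getD (m : List (List Int)) (k : Int) (hk : 0 ≤ k) (x y : Int)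
    (hx : x < (m.length : Int) + k) (hy : y < ((m.headD []).length : Int) + k) :
    (ABuild m k).getD (x, y) 0 = Pm m (m.headD []).length x y := by
  rw [ABuild, show (m.length : Int) + k = ((((m.length : Int) + k).toNat : Nat) : Int) by omega,
    outer_fold m _ (by omega), HF]
  by_cases hx0 : 0 ≤ x
  · by_cases hy0 : 0 ≤ y
    · rw [if_pos (Or.inl ⟨hx0, by omega, hy0, by omega⟩)]
    · rw [if_neg (by omega), Pm_neg_right _ _ _ _ (by omega)]
  · rw [if_neg (by omega), Pm_neg_left _ _ _ _ (by omega)]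

lemma Pn_row_min (m : List (List Int)) (Cn r c : Nat) :
    Pn m Cn r c = Pn m Cn (min r m.length) c := by
  by_cases h : r ≤ m.length
  · rw [Nat.min_eq_left h]
  · rw [Nat.min_eq_right (by omega), Pn_row_clamp _ _ _ _ (by omega)]

-- ---- B-side: window sums ----

-- window sum of one row between the clamped column bounds, as a difference of take-sums
def wf (Cn : Nat) (k : Int) (row : List Int) (j : Int) : Int :=
  (row.take (min (j + k + 1).toNat Cn)).sum - (row.take (min (j - k).toNat Cn)).sum

-- the column-window sum over rows r1..r2-1
def S (m : List (List Int)) (Cn : Nat) (k : Int) (r1 r2 : Nat) (j : Int) : Int :=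
  (Pn m Cn r2 (j + k + 1).toNat - Pn m Cn r2 (j - k).toNat)
    - (Pn m Cn r1 (j + k + 1).toNat - Pn m Cn r1 (j - k).toNat)

lemma S_self (m : List (List Int)) (Cn : Nat) (k : Int) (r : Nat) (j : Int) :
    S m Cn k r r j = 0 := by
  unfold S; ring

lemma S_succ_top (m : List (List Int)) (Cn : Nat) (k : Int) (r1 r2 : Nat) (j : Int) :
    S m Cn k r1 (r2 + 1) j = S m Cn k r1 r2 j + wf Cn k (m.getD r2 []) j := by
  unfold S wf
  rw [Pn_row_succ, Pn_row_succ]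
  ring

lemma S_succ_bot (m : List (List Int)) (Cn : Nat) (k : Int) (r1 r2 : Nat) (j : Int) :
    S m Cn k (r1 + 1) r2 j = S m Cn k r1 r2 j - wf Cn k (m.getD r1 []) j := by
  unfold S wf
  rw [Pn_row_succ, Pn_row_succ]
  ring

lemma wf_zero (Cn : Nat) (k : Int) (row : List Int) (hk : 0 ≤ k) :
    wf Cn k row 0 = (row.take (min (k + 1).toNat Cn)).sum := by
  unfold wf
  rw [show (0 - k).toNat = 0 by omega, show (0 + k + 1).toNat = (k + 1).toNat by omega]
  simp

lemma wstep (Cn : Nat) (k : Int) (row : List Int) (j : Int)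
    (hk : 0 ≤ k) (hj1 : 1 ≤ j) (hjC : j < (Cn : Int)) (_hlen : Cn ≤ row.length) :
    wf Cn k row j
      = (let s := if j + k < (Cn : Int) then wf Cn k row (j - 1) + PySem.List.pyGetD row (j + k) 0
                  else wf Cn k row (j - 1)
         if 1 ≤ j - k then s - PySem.List.pyGetD row (j - k - 1) 0 else s) := by
  show (row.take (min (j + k + 1).toNat Cn)).sum - (row.take (min (j - k).toNat Cn)).sum
      = if 1 ≤ j - k then
          (if j + k < (Cn : Int) then wf Cn k row (j - 1) + PySem.List.pyGetD row (j + k) 0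
           else wf Cn k row (j - 1)) - PySem.List.pyGetD row (j - k - 1) 0
        else
          (if j + k < (Cn : Int) then wf Cn k row (j - 1) + PySem.List.pyGetD row (j + k) 0
           else wf Cn k row (j - 1))
  have hup : (row.take (min (j + k + 1).toNat Cn)).sum
      = (if j + k < (Cn : Int) then (row.take (min (j - 1 + k + 1).toNat Cn)).sum + PySem.List.pyGetD row (j + k) 0
         else (row.take (min (j - 1 + k + 1).toNat Cn)).sum) := by
    by_cases hc : j + k < (Cn : Int)
    · have hg : PySem.List.pyGetD row (j + k) 0 = row.getD (j + k).toNat 0 := by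
        have hcast : j + k = (((j + k).toNat : Nat) : Int) := by omega
        rw [hcast, PySem.List.pyGetD_natCast, Int.toNat_natCast]
      rw [if_pos hc, show min (j + k + 1).toNat Cn = (j + k).toNat + 1 by omega,
        show min (j - 1 + k + 1).toNat Cn = (j + k).toNat by omega, takeSum, hg]
    · rw [if_neg hc, show min (j + k + 1).toNat Cn = Cn by omega,
        show min (j - 1 + k + 1).toNat Cn = Cn by omega]
  have hlo : (row.take (min (j - k).toNat Cn)).sum
      = (if 1 ≤ j - k then (row.take (min (j - 1 - k).toNat Cn)).sum + PySem.List.pyGetD row (j - k - 1) 0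
         else (row.take (min (j - 1 - k).toNat Cn)).sum) := by
    by_cases hc : 1 ≤ j - k
    · have hg : PySem.List.pyGetD row (j - k - 1) 0 = row.getD (j - k - 1).toNat 0 := by
        have hcast : j - k - 1 = (((j - k - 1).toNat : Nat) : Int) := by omega
        rw [hcast, PySem.List.pyGetD_natCast, Int.toNat_natCast]
      rw [if_pos hc, show min (j - k).toNat Cn = (j - k - 1).toNat + 1 by omega,
        show min (j - 1 - k).toNat Cn = (j - k - 1).toNat by omega, takeSum, hg]
    · rw [if_neg hc, show min (j - k).toNat Cn = min (j - 1 - k).toNat Cn by omega]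
  rw [hup, hlo]
  unfold wf
  split_ifs <;> ring

lemma hBody_eq (Cn : Nat) (k : Int) (row : List Int) (L : List Int) (v j : Int)
    (hv : v = wf Cn k row (j - 1)) (hk : 0 ≤ k) (hj1 : 1 ≤ j) (hjC : j < (Cn : Int))
    (hlen : Cn ≤ row.length) :
    hBody (Cn : Int) k row (L, v) j = (L ++ [wf Cn k row j], wf Cn k row j) := by
  subst hv
  rw [wstep Cn k row j hk hj1 hjC hlen]
  rfl

-- hRow computes the window sums of a row
lemma hRow_eq (Cn : Nat) (k : Int) (row : List Int)
    (hk : 0 ≤ k) (hC : 1 ≤ Cn) (hlen : Cn ≤ row.length) :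
    hRow (Cn : Int) k row = (List.range Cn).map (fun j : Nat => wf Cn k row (j : Int)) := by
  have hs0 : (PySem.List.slice row none (some (min (k + 1) (Cn : Int)))).sum = wf Cn k row 0 := by
    rw [PySem.List.slice_to row (by omega), wf_zero _ _ _ hk,
      show (min (k + 1) ((Cn : Nat) : Int)).toNat = min (k + 1).toNat Cn by omega]
  simp only [hRow, hs0]
  rw [PySem.List.pyRange_one, show ((Cn : Int) - 1).toNat = Cn - 1 by omega, List.foldl_map]
  have key : ∀ n : Nat, n ≤ Cn - 1 →
      (List.range n).foldl (fun (st : List Int × Int) (t : Nat) =>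
          hBody (Cn : Int) k row st (1 + (t : Int))) ([wf Cn k row 0], wf Cn k row 0)
        = ((List.range (n + 1)).map (fun j : Nat => wf Cn k row (j : Int)), wf Cn k row (n : Int)) := by
    intro n hn
    induction n with
    | zero => simp
    | succ n ih =>
      rw [List.range_succ, List.foldl_append, ih (by omega), List.foldl_cons, List.foldl_nil,
        hBody_eq Cn k row _ _ (1 + (n : Int))
          (by rw [show (1 : Int) + (n : Int) - 1 = (n : Int) by ring])
          hk (by omega) (by omega) hlen]
      rw [List.range_succ (n := n + 1), List.map_append, List.map_singleton,
        show ((n + 1 : Nat) : Int) = 1 + (n : Int) by push_cast; ring]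
  rw [key (Cn - 1) le_rfl, Nat.sub_add_cancel hC]

-- zipWith against a window-sum row, in one step (covers Cn = 0, where both sides are [])
lemma zip_hRow (Cn : Nat) (k : Int) (row : List Int) (f : Int → Int → Int) (g : Nat → Int)
    (hk : 0 ≤ k) (hlen : Cn ≤ row.length) :
    List.zipWith f ((List.range Cn).map g) (hRow (Cn : Int) k row)
      = (List.range Cn).map (fun j : Nat => f (g j) (wf Cn k row (j : Int))) := by
  rcases Nat.eq_zero_or_pos Cn with h0 | h1
  · subst h0; simp
  · rw [hRow_eq Cn k row hk h1 hlen, List.zipWith_map]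
    exact List.zipWith_self

-- the initial acc after folding H[:k+1]
lemma acc0_eq (m : List (List Int)) (Cn : Nat) (k : Int) (t : Nat)
    (hk : 0 ≤ k) (ht : t ≤ m.length) (hlen : ∀ row ∈ m, Cn ≤ row.length) :
    ((m.take t).map (hRow (Cn : Int) k)).foldl (fun acc r => List.zipWith (· + ·) acc r)
        ((List.range Cn).map (fun _ => (0 : Int)))
      = (List.range Cn).map (fun j : Nat => S m Cn k 0 t (j : Int)) := by
  induction t with
  | zero =>
    simp [S_self]
  | succ t ih =>
    have htl : t < m.length := by omega
    have hgetD : m.getD t [] = m[t] := by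
      rw [List.getD_eq_getElem?_getD, List.getElem?_eq_getElem htl]; rfl
    rw [List.take_add_one, List.getElem?_eq_getElem htl]
    simp only [Option.toList_some]
    rw [List.map_append, List.foldl_append, ih (by omega), List.map_singleton,
      List.foldl_cons, List.foldl_nil,
      zip_hRow Cn k _ _ _ hk (hlen _ (List.getElem_mem htl))]
    apply List.map_congr_left
    intro j _
    rw [S_succ_top, hgetD]

-- indexing into the list of window-sum rows
lemma getH (m : List (List Int)) (Cn : Nat) (k x : Int) (hx0 : 0 ≤ x) (hxR : x < (m.length : Int)) :
    PySem.List.pyGetD (m.map (hRow (Cn : Int) k)) x [] = hRow (Cn : Int) k (m.getD x.toNat []) := by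
  have ht : x.toNat < m.length := by omega
  rw [show x = ((x.toNat : Nat) : Int) by omega, PySem.List.pyGetD_natCast, Int.toNat_natCast,
    List.getD_eq_getElem?_getD, List.getElem?_map, List.getElem?_eq_getElem ht,
    List.getD_eq_getElem?_getD, List.getElem?_eq_getElem ht]
  rfl

lemma getD_mem_len (m : List (List Int)) (Cn : Nat)
    (hlen : ∀ row ∈ m, Cn ≤ row.length) (t : Nat) (ht : t < m.length) :
    Cn ≤ (m.getD t []).length := by
  rw [List.getD_eq_getElem?_getD, List.getElem?_eq_getElem ht]
  exact hlen _ (List.getElem_mem ht)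

-- the vertical sliding-window invariant and the whole outer loop
lemma outer_eq (m : List (List Int)) (Cn : Nat) (k : Int) (n : Nat)
    (hk : 0 ≤ k) (hn : n ≤ m.length) (hlen : ∀ row ∈ m, Cn ≤ row.length) :
    ((PySem.List.pyRange 0 (n : Int) 1).foldl (fun (st : List (List Int) × List Int) i =>
        let out := st.1 ++ [st.2]
        let acc := if i + k + 1 < (m.length : Int) then
            List.zipWith (· + ·) st.2 (PySem.List.pyGetD (m.map (hRow (Cn : Int) k)) (i + k + 1) [])
          else st.2
        let acc := if 0 ≤ i - k then
            List.zipWith (· - ·) acc (PySem.List.pyGetD (m.map (hRow (Cn : Int) k)) (i - k) [])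
          else acc
        (out, acc))
      ([], (List.range Cn).map (fun j : Nat => S m Cn k 0 ((min (k + 1) (m.length : Int)).toNat) (j : Int))))
    = ((List.range n).map (fun i : Nat =>
          (List.range Cn).map (fun j : Nat =>
            S m Cn k ((i : Int) - k).toNat ((min ((i : Int) + k + 1) (m.length : Int)).toNat) (j : Int))),
       (List.range Cn).map (fun j : Nat =>
          S m Cn k ((n : Int) - k).toNat ((min ((n : Int) + k + 1) (m.length : Int)).toNat) (j : Int))) := by
  induction n with
  | zero =>
    rw [PySem.List.pyRange_one_eq_nil (by simp)]
    simp only [List.foldl_nil, List.range_zero, List.map_nil, Nat.cast_zero, Prod.mk.injEq,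
      zero_add, zero_sub, true_and]
    rw [show ((-k).toNat) = 0 by omega]
  | succ n ih =>
    rw [show ((n + 1 : Nat) : Int) = (n : Int) + 1 by push_cast; ring,
      PySem.List.pyRange_one_succ_right (by omega), List.foldl_append,
      ih (by omega), List.foldl_cons, List.foldl_nil]
    dsimp only
    rw [Prod.mk.injEq]
    constructor
    · rw [List.range_succ, List.map_append, List.map_singleton]
    · by_cases hA : (n : Int) + k + 1 < (m.length : Int)
      · have e : (min ((n : Int) + k + 1) (m.length : Int)).toNat = ((n : Int) + k + 1).toNat := by
          omega
        rw [if_pos hA, e, getH m Cn k _ (by omega) hA,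
          zip_hRow Cn k _ _ _ hk (getD_mem_len m Cn hlen _ (by omega))]
        by_cases hB : 0 ≤ (n : Int) - k
        · rw [if_pos hB, getH m Cn k _ hB (by omega),
            zip_hRow Cn k _ _ _ hk (getD_mem_len m Cn hlen _ (by omega))]
          apply List.map_congr_left
          intro j _
          rw [show ((n : Int) + 1 - k).toNat = ((n : Int) - k).toNat + 1 by omega,
            show (min ((n : Int) + 1 + k + 1) (m.length : Int)).toNat
              = ((n : Int) + k + 1).toNat + 1 by omega,
            S_succ_bot, S_succ_top]
        · rw [if_neg hB]
          apply List.map_congr_left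
          intro j _
          rw [show ((n : Int) + 1 - k).toNat = ((n : Int) - k).toNat by omega,
            show (min ((n : Int) + 1 + k + 1) (m.length : Int)).toNat
              = ((n : Int) + k + 1).toNat + 1 by omega,
            S_succ_top]
      · rw [if_neg hA]
        have e2 : (min ((n : Int) + 1 + k + 1) (m.length : Int)).toNat
            = (min ((n : Int) + k + 1) (m.length : Int)).toNat := by omega
        by_cases hB : 0 ≤ (n : Int) - k
        · rw [if_pos hB, getH m Cn k _ hB (by omega),
            zip_hRow Cn k _ _ _ hk (getD_mem_len m Cn hlen _ (by omega))]
          apply List.map_congr_left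
          intro j _
          rw [show ((n : Int) + 1 - k).toNat = ((n : Int) - k).toNat + 1 by omega, e2,
            S_succ_bot]
        · rw [if_neg hB]
          apply List.map_congr_left
          intro j _
          rw [show ((n : Int) + 1 - k).toNat = ((n : Int) - k).toNat by omega, e2]

-- A's cell equals the window sum S
lemma Acell_eq_S (m : List (List Int)) (k i j : Int)
    (hk : 0 ≤ k) (hi0 : 0 ≤ i) (hiR : i < (m.length : Int))
    (_hj0 : 0 ≤ j) (hjC : j < ((m.headD []).length : Int)) :
    (ABuild m k).getD (i + k, j + k) 0 + (ABuild m k).getD (i - k - 1, j - k - 1) 0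
      - (ABuild m k).getD (i + k, j - k - 1) 0 - (ABuild m k).getD (i - k - 1, j + k) 0
    = S m (m.headD []).length k (i - k).toNat ((min (i + k + 1) (m.length : Int)).toNat) j := by
  rw [dict_getD m k hk _ _ (by omega) (by omega),
    dict_getD m k hk _ _ (by omega) (by omega),
    dict_getD m k hk _ _ (by omega) (by omega),
    dict_getD m k hk _ _ (by omega) (by omega)]
  simp only [Pm]
  unfold S
  rw [show i - k - 1 + 1 = i - k by ring, show j - k - 1 + 1 = j - k by ring]
  rw [Pn_row_min m ((m.headD []).length) ((i + k + 1).toNat) ((j + k + 1).toNat),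
    Pn_row_min m ((m.headD []).length) ((i + k + 1).toNat) ((j - k).toNat),
    show min (i + k + 1).toNat m.length = (min (i + k + 1) (m.length : Int)).toNat by omega]
  ring

lemma solve_eq (m : List (List Int)) (k : Int) :
    solve m k = (PySem.List.pyRange 0 (m.length : Int) 1).map (fun i =>
      (PySem.List.pyRange 0 ((m.headD []).length : Int) 1).map (fun j =>
        (ABuild m k).getD (i + k, j + k) 0 + (ABuild m k).getD (i - k - 1, j - k - 1) 0
          - (ABuild m k).getD (i + k, j - k - 1) 0 - (ABuild m k).getD (i - k - 1, j + k) 0)) := rfl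

lemma solve_eq_alt : ∀ (matrix : List (List Int)) (k : Int),
    matrix ≠ [] → 0 ≤ k → (∀ row ∈ matrix, (matrix.headD []).length ≤ row.length) →
    solve matrix k = solve_alt matrix k := by
  intro m k hne hk hlen
  have hR1 : 0 < m.length := List.length_pos_iff.mpr hne
  rw [solve_eq]
  simp only [solve_alt]
  rw [PySem.List.foldl_append_singleton_eq_map, List.nil_append,
    PySem.List.slice_to _ (by omega), ← List.map_take,
    show m.take (k + 1).toNat = m.take (min (k + 1).toNat m.length) by
      rcases le_total (k + 1).toNat m.length with h | h
      · rw [Nat.min_eq_left h]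
      · rw [Nat.min_eq_right h, List.take_length, List.take_of_length_le h],
    PySem.List.pyRepeat_singleton, Int.toNat_natCast,
    show List.replicate (m.headD []).length (0 : Int)
        = (List.range (m.headD []).length).map (fun _ => (0 : Int)) by
      rw [List.map_const', List.length_range],
    acc0_eq m ((m.headD []).length) k _ hk (Nat.min_le_right _ _) hlen,
    show min (k + 1).toNat m.length = (min (k + 1) (m.length : Int)).toNat by omega,
    outer_eq m ((m.headD []).length) k m.length hk le_rfl hlen]
  simp only [PySem.List.pyRange_zero_nat, List.map_map]
  apply List.map_congr_left
  intro i hi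
  apply List.map_congr_left
  intro j hj
  simp only [Function.comp]
  exact Acell_eq_S m k (i : Int) (j : Int) hk (by omega)
    (by exact_mod_cast List.mem_range.mp hi) (by omega)
    (by exact_mod_cast List.mem_range.mp hj)

-- ===== VERDICT (by name: the statement is the Claim_ definition above) =====
theorem solve_spec : Claim_equal_solve := by
  intro m k _ hpre
  exact solve_eq_alt m k hpre.1 hpre.2.1 hpre.2.2
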